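-- pv_equiv track=rewrite | github.com/pypi-data/pypi-mirror-401 | packages/ara-cli/ara_cli-0.1.13.4-py3-none-any.whl/ara_cli/artefact_autofix.py | fix_misplaced_content
-- ===== SOURCE A (Python) =====
-- def fix_misplaced_content(file_path: str, artefact_text: str, **kwargs) -> str:
--     """
--     Deterministically fixes content like 'Rule:' or 'Estimate:' misplaced in the description.
--     """
--     lines = artefact_text.splitlines()
--
--     desc_start_idx = -1
--     for i, line in enumerate(lines):
--         if line.strip().startswith("Description:"):
--             desc_start_idx = i
--             break
--
--     if desc_start_idx == -1:
--         return artefact_text  # No description, nothing to fix.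
--
--     pre_desc_lines = lines[:desc_start_idx]
--     desc_line = lines[desc_start_idx]
--     post_desc_lines = lines[desc_start_idx + 1 :]
--
--     misplaced_content = []
--     new_post_desc_lines = []
--
--     for line in post_desc_lines:
--         if line.strip().startswith("Rule:") or line.strip().startswith("Estimate:"):
--             misplaced_content.append(line)
--         else:
--             new_post_desc_lines.append(line)
--
--     if not misplaced_content:
--         return artefact_text
--
--     # Rebuild the file content
--     final_lines = (
--         pre_desc_lines + misplaced_content + [""] + [desc_line] + new_post_desc_lines
--     )
--     return "\n".join(final_lines)
-- ===== SOURCE B (Python) =====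
-- def fix_misplaced_content(file_path: str, artefact_text: str, **kwargs) -> str:
--     """Schedule-sort: tag every line with a placement key, then stable-sort by key."""
--     # keys: 0 = before description, 1 = misplaced Rule:/Estimate:, 2 = blank spacer,
--     #       3 = the Description line itself, 4 = remaining description body
--     keyed = []
--     seen_desc = False
--     for line in artefact_text.splitlines():
--         s = line.strip()
--         if not seen_desc:
--             if s.startswith("Description:"):
--                 seen_desc = True
--                 keyed.append((3, line))
--             else:
--                 keyed.append((0, line))
--         elif s.startswith("Rule:") or s.startswith("Estimate:"):
--             keyed.append((1, line))
--         else: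
--             keyed.append((4, line))
--     if not any(k == 1 for k, _ in keyed):
--         return artefact_text  # no description or nothing misplaced
--     keyed.append((2, ""))
--     return "\n".join(line for _, line in sorted(keyed, key=lambda p: p[0]))
-- ===== Notes on version B (the rewrite author's own statement) =====
-- stated objective: alternative
-- what changed: Instead of A's find-the-Description-index, slice and partition-into-lists pipeline, B tags every line with a numeric placement key (pre=0, misplaced=1, spacer=2, description=3, body=4) and obtains the output order by a stable sort on that key.
import Mathlib
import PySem

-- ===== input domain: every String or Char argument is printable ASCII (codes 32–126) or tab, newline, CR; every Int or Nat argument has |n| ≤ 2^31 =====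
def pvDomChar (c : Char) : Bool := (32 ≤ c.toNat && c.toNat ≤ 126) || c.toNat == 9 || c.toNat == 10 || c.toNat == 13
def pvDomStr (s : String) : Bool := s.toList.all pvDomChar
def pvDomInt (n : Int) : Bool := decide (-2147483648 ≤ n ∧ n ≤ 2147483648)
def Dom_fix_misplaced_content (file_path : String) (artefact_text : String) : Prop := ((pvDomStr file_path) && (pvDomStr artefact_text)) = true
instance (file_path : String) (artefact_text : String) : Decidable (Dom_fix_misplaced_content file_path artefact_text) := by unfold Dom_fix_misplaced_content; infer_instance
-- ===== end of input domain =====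

-- B replaces A's find-index/slice/partition pipeline by tagging each line with a
-- numeric placement key and stable-sorting by that key; same return value.

-- shared line predicates (the literal conditions of both Pythons)
def pvIsDesc (l : String) : Bool := PySem.Str.startswith (PySem.Str.strip l) "Description:"
def pvIsMis (l : String) : Bool :=
  PySem.Str.startswith (PySem.Str.strip l) "Rule:" || PySem.Str.startswith (PySem.Str.strip l) "Estimate:"

-- ===== PORT A =====
-- A's first loop + the three slices: first Description line with what precedes and follows it
def pvSplitDesc : List String → Option (List String × String × List String)
  | [] => none
  | l :: ls =>
    if pvIsDesc l then some ([], l, ls)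
    else
      match pvSplitDesc ls with
      | none => none
      | some (p, d, q) => some (l :: p, d, q)

def fix_misplaced_content (file_path : String) (artefact_text : String) : String :=
  let lines := PySem.Str.splitlines artefact_text
  match pvSplitDesc lines with
  | none => artefact_text
  | some (pre_desc_lines, desc_line, post_desc_lines) =>
    -- A's second loop: partition the post-description lines
    let r := post_desc_lines.foldl
      (fun (acc : List String × List String) line =>
        if pvIsMis line then (acc.1 ++ [line], acc.2) else (acc.1, acc.2 ++ [line]))
      ([], [])
    if r.1 = [] then artefact_text
    else PySem.Str.join "\n" (pre_desc_lines ++ r.1 ++ [""] ++ [desc_line] ++ r.2)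

-- ===== PORT B =====
-- B's tagging loop: key 0 = pre, 1 = misplaced, 2 = spacer, 3 = Description line, 4 = body
def pvTagStep (st : Bool × List (Nat × String)) (line : String) : Bool × List (Nat × String) :=
  match st with
  | (false, acc) =>
    if pvIsDesc line then (true, acc ++ [(3, line)]) else (false, acc ++ [(0, line)])
  | (true, acc) =>
    if pvIsMis line then (true, acc ++ [(1, line)]) else (true, acc ++ [(4, line)])

def fix_misplaced_content_alt (file_path : String) (artefact_text : String) : String :=
  let keyed := ((PySem.Str.splitlines artefact_text).foldl pvTagStep (false, [])).2
  if keyed.any (fun p => p.1 == 1) then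
    PySem.Str.join "\n" ((PySem.List.sorted (keyed ++ [(2, "")]) Prod.fst).map Prod.snd)
  else artefact_text

-- ===== PRECONDITION & SPEC =====
def Spec_fix_misplaced_content (file_path : String) (artefact_text : String) (out : String) : Prop := out = fix_misplaced_content_alt file_path artefact_text
instance (file_path : String) (artefact_text : String) (out : String) : Decidable (Spec_fix_misplaced_content file_path artefact_text out) := by unfold Spec_fix_misplaced_content; infer_instance

-- ===== CLAIM =====
def Claim_equal_fix_misplaced_content : Prop := ∀ (file_path : String) (artefact_text : String), Dom_fix_misplaced_content file_path artefact_text → Spec_fix_misplaced_content file_path artefact_text (fix_misplaced_content file_path artefact_text)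

-- ===== LEMMAS AND PROOFS =====

-- A's partition loop computes the two filters
lemma foldA_filter (q : List String) (m r : List String) :
    q.foldl (fun (acc : List String × List String) line =>
        if pvIsMis line then (acc.1 ++ [line], acc.2) else (acc.1, acc.2 ++ [line])) (m, r)
      = (m ++ q.filter pvIsMis, r ++ q.filter (fun l => !pvIsMis l)) := by
  induction q generalizing m r with
  | nil => simp
  | cons l ls ih =>
    by_cases h : pvIsMis l = true <;> simp [List.foldl, h, ih]

def pvTag (l : String) : Nat × String := if pvIsMis l then (1, l) else (4, l)

-- B's tagging fold after the Description line has been seen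
lemma tagfold_seen (q : List String) (acc : List (Nat × String)) :
    q.foldl pvTagStep (true, acc) = (true, acc ++ q.map pvTag) := by
  induction q generalizing acc with
  | nil => simp
  | cons l ls ih =>
    by_cases h : pvIsMis l = true <;> simp [List.foldl, pvTagStep, pvTag, h, ih]

-- B's tagging fold, related to A's splitter
lemma tagfold_split (ls : List String) (acc : List (Nat × String)) :
    ls.foldl pvTagStep (false, acc)
      = match pvSplitDesc ls with
        | none => (false, acc ++ ls.map (fun l => (0, l)))
        | some (p, d, q) => (true, (acc ++ p.map (fun l => (0, l)) ++ [(3, d)]) ++ q.map pvTag) := by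
  induction ls generalizing acc with
  | nil => simp [pvSplitDesc]
  | cons l ls ih =>
    by_cases h : pvIsDesc l = true
    · simp [List.foldl, pvTagStep, h, pvSplitDesc, tagfold_seen]
    · simp only [List.foldl, pvTagStep, h, if_false, Bool.false_eq_true, ih, pvSplitDesc]
      cases hs : pvSplitDesc ls with
      | none => simp
      | some t => obtain ⟨p, d, q⟩ := t; simp

-- bucket decomposition of a key-bounded list
def pvBuckets (ps : List (Nat × String)) : List (Nat × String) :=
  ps.filter (fun p => p.1 == 0) ++ ps.filter (fun p => p.1 == 1) ++ ps.filter (fun p => p.1 == 2)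
    ++ ps.filter (fun p => p.1 == 3) ++ ps.filter (fun p => p.1 == 4)

lemma insertBy_skip (before : Nat × String → Nat × String → Bool) (x : Nat × String)
    (l rest : List (Nat × String)) (h : ∀ y ∈ l, before x y = false) :
    PySem.List.insertBy before x (l ++ rest) = l ++ PySem.List.insertBy before x rest := by
  induction l with
  | nil => simp
  | cons y ys ih =>
    have hy := h y (by simp)
    simp [PySem.List.insertBy, hy, ih (fun z hz => h z (by simp [hz]))]

lemma insertBy_front (before : Nat × String → Nat × String → Bool) (x : Nat × String)
    (rest : List (Nat × String)) (h : ∀ y ∈ rest, before x y = true) :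
    PySem.List.insertBy before x rest = x :: rest := by
  cases rest with
  | nil => simp [PySem.List.insertBy]
  | cons y ys => simp [PySem.List.insertBy, h y (by simp)]

lemma ins5 (x : Nat × String) (f0 f1 f2 f3 f4 : List (Nat × String))
    (h0 : ∀ y ∈ f0, y.1 = 0) (h1 : ∀ y ∈ f1, y.1 = 1) (h2 : ∀ y ∈ f2, y.1 = 2)
    (h3 : ∀ y ∈ f3, y.1 = 3) (h4 : ∀ y ∈ f4, y.1 = 4) (hx : x.1 ≤ 4) :
    PySem.List.insertBy (fun a b => decide (a.1 < b.1)) x (f0 ++ (f1 ++ (f2 ++ (f3 ++ f4))))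
      = (f0 ++ (if x.1 = 0 then [x] else [])) ++ ((f1 ++ (if x.1 = 1 then [x] else []))
        ++ ((f2 ++ (if x.1 = 2 then [x] else [])) ++ ((f3 ++ (if x.1 = 3 then [x] else []))
        ++ (f4 ++ (if x.1 = 4 then [x] else []))))) := by
  obtain ⟨v, s⟩ := x
  simp only at hx ⊢
  interval_cases v
  · rw [insertBy_skip _ _ f0 _ (by intro y hy; simp [h0 y hy]),
      insertBy_front _ _ _ (by
        intro y hy
        simp only [List.mem_append] at hy
        rcases hy with hy | hy | hy | hy <;>
          simp [h1 y, h2 y, h3 y, h4 y, hy])]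
    simp
  · rw [show f0 ++ (f1 ++ (f2 ++ (f3 ++ f4))) = (f0 ++ f1) ++ (f2 ++ (f3 ++ f4)) by simp,
      insertBy_skip _ _ _ _ (by
        intro y hy
        simp only [List.mem_append] at hy
        rcases hy with hy | hy <;> simp [h0 y, h1 y, hy]),
      insertBy_front _ _ _ (by
        intro y hy
        simp only [List.mem_append] at hy
        rcases hy with hy | hy | hy <;> simp [h2 y, h3 y, h4 y, hy])]
    simp
  · rw [show f0 ++ (f1 ++ (f2 ++ (f3 ++ f4))) = (f0 ++ f1 ++ f2) ++ (f3 ++ f4) by simp,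
      insertBy_skip _ _ _ _ (by
        intro y hy
        simp only [List.mem_append] at hy
        rcases hy with (hy | hy) | hy <;> simp [h0 y, h1 y, h2 y, hy]),
      insertBy_front _ _ _ (by
        intro y hy
        simp only [List.mem_append] at hy
        rcases hy with hy | hy <;> simp [h3 y, h4 y, hy])]
    simp
  · rw [show f0 ++ (f1 ++ (f2 ++ (f3 ++ f4))) = (f0 ++ f1 ++ f2 ++ f3) ++ f4 by simp,
      insertBy_skip _ _ _ _ (by
        intro y hy
        simp only [List.mem_append] at hy
        rcases hy with ((hy | hy) | hy) | hy <;> simp [h0 y, h1 y, h2 y, h3 y, hy]),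
      insertBy_front _ _ _ (by intro y hy; simp [h4 y hy])]
    simp
  · rw [show f0 ++ (f1 ++ (f2 ++ (f3 ++ f4))) = (f0 ++ f1 ++ f2 ++ f3 ++ f4) ++ [] by simp,
      insertBy_skip _ _ _ _ (by
        intro y hy
        simp only [List.mem_append] at hy
        rcases hy with (((hy | hy) | hy) | hy) | hy <;>
          simp [h0 y, h1 y, h2 y, h3 y, h4 y, hy])]
    simp [PySem.List.insertBy]

lemma insertBy_bucket (x : Nat × String) (ps : List (Nat × String)) (hx : x.1 ≤ 4) :
    PySem.List.insertBy (fun a b => decide (a.1 < b.1)) x (pvBuckets ps) = pvBuckets (ps ++ [x]) := by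
  unfold pvBuckets
  rw [List.append_assoc, List.append_assoc, List.append_assoc,
    ins5 x _ _ _ _ _ (fun y hy => by simpa using (List.mem_filter.1 hy).2)
      (fun y hy => by simpa using (List.mem_filter.1 hy).2)
      (fun y hy => by simpa using (List.mem_filter.1 hy).2)
      (fun y hy => by simpa using (List.mem_filter.1 hy).2)
      (fun y hy => by simpa using (List.mem_filter.1 hy).2) hx]
  simp only [List.filter_append, List.filter_cons, List.filter_nil]
  obtain ⟨v, s⟩ := x
  by_cases e0 : v = 0 <;> by_cases e1 : v = 1 <;> by_cases e2 : v = 2 <;>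
    by_cases e3 : v = 3 <;> by_cases e4 : v = 4 <;> simp_all

lemma sorted_buckets (ps : List (Nat × String)) (h : ∀ p ∈ ps, p.1 ≤ 4) :
    PySem.List.sorted ps Prod.fst = pvBuckets ps := by
  rw [PySem.List.sorted_eq_foldl_insertBy]
  induction ps using List.reverseRecOn with
  | nil => simp [pvBuckets]
  | append_singleton ps x ih =>
    rw [List.foldl_append, List.foldl_cons, List.foldl_nil,
      ih (fun p hp => h p (by simp [hp])), insertBy_bucket x ps (h x (by simp))]

-- filters of the tagged tail
lemma tag_filter (q : List String) (i : Nat) :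
    (q.map pvTag).filter (fun p => p.1 == i)
      = if i = 1 then (q.filter pvIsMis).map (fun l => (1, l))
        else if i = 4 then (q.filter (fun l => !pvIsMis l)).map (fun l => (4, l))
        else [] := by
  induction q with
  | nil => split_ifs <;> simp
  | cons l ls ih =>
    by_cases h : pvIsMis l = true <;>
      (simp only [List.map_cons, List.filter_cons, pvTag, h, if_true, if_false,
        Bool.false_eq_true, ih]
       split_ifs with h1 h2 <;> simp_all)

lemma zero_filter (p : List String) (i : Nat) :
    (p.map (fun l => ((0 : Nat), l))).filter (fun r => r.1 == i)
      = if i = 0 then p.map (fun l => ((0 : Nat), l)) else [] := by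
  rw [List.filter_map]
  by_cases h : i = 0
  · simp [h, Function.comp_def]
  · simp only [h, if_false]
    simp [Function.comp_def]
    intro a _; omega

-- ===== VERDICT =====
theorem fix_misplaced_content_spec : Claim_equal_fix_misplaced_content := by
  intro fp text _
  unfold Spec_fix_misplaced_content fix_misplaced_content fix_misplaced_content_alt
  simp only [tagfold_split]
  cases hs : pvSplitDesc (PySem.Str.splitlines text) with
  | none => simp
  | some t =>
    obtain ⟨p, d, q⟩ := t
    simp only [foldA_filter, List.nil_append]
    have hkeys : ∀ r ∈ p.map (fun l => ((0 : Nat), l)) ++ [((3 : Nat), d)] ++ q.map pvTag ++ [((2 : Nat), "")],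
        r.1 ≤ 4 := by
      intro r hr
      simp only [List.mem_append, List.mem_map, List.mem_singleton] at hr
      rcases hr with ((⟨l, _, rfl⟩ | rfl) | ⟨l, _, rfl⟩) | rfl
      · simp
      · simp
      · simp only [pvTag]; split_ifs <;> simp
      · simp
    rw [sorted_buckets _ hkeys]
    unfold pvBuckets
    have hany : ((p.map (fun l => ((0 : Nat), l)) ++ [((3 : Nat), d)] ++ q.map pvTag).any
        (fun r => r.1 == 1)) = !(q.filter pvIsMis).isEmpty := by
      simp only [List.any_append]
      cases hm : (q.filter pvIsMis).isEmpty with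
      | true =>
        simp only [List.isEmpty_iff] at hm
        simp only [Bool.not_true, Bool.or_eq_false_iff]
        refine ⟨⟨by simp, by simp⟩, ?_⟩
        simp only [List.any_eq_false]
        intro r hr
        simp only [List.mem_map] at hr
        obtain ⟨l, hl, rfl⟩ := hr
        by_cases hml : pvIsMis l = true
        · exact absurd (List.mem_filter.2 ⟨hl, hml⟩) (by simp [hm])
        · simp [pvTag, hml]
      | false =>
        simp only [Bool.not_false, Bool.or_eq_true, List.any_eq_true]
        rw [List.isEmpty_eq_false_iff] at hm
        obtain ⟨l, hl⟩ := List.exists_mem_of_ne_nil _ hm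
        simp only [List.mem_filter] at hl
        refine Or.inr ⟨pvTag l, List.mem_map_of_mem hl.1, ?_⟩
        simp [pvTag, hl.2]
    rw [hany]
    by_cases hm : q.filter pvIsMis = []
    · simp [hm]
    · simp only [hm, if_false, List.isEmpty_eq_false_iff, ne_eq, hm, not_false_iff,
        Bool.not_false]
      simp only [List.filter_append, tag_filter, zero_filter, List.filter_cons,
        List.filter_nil]
      simp [List.map_map]
      intro hall
      exact absurd (List.filter_eq_nil_iff.mpr (by intro a ha; simp [hall a ha])) hm
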